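-- pv_equiv track=rewrite | github.com/hagixxg28/uni_python | bulls_and_cows_game.py | num_of_existing_digits
-- ===== SOURCE A (Python) =====
-- def is_digit_exist(num: int, digit: int) -> bool:
--     """
--          Determines if the digit is within the number
--          :return:
--              bool
--      """
--     num_str = str(num)
--     digit_str = str(digit)
--     return digit_str in num_str
--
-- def num_of_existing_digits(guess_num: int, secret_num: int) -> int:
--     """
--          Determines the number of digits that exist within the secret number
--          :return:
--              int
--      """
--     existing_digits = 0
--     guess_num_str = str(guess_num)
--
--     for digit_str in guess_num_str:
--         digit = int(digit_str)
--         if is_digit_exist(num=secret_num, digit=digit):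
--             existing_digits += 1
--
--     return existing_digits
-- ===== SOURCE B (Python) =====
-- def num_of_existing_digits(guess_num: int, secret_num: int) -> int:
--     """Frequency-table version: index the guess's characters once, then sum
--     their multiplicities over the distinct characters of the secret number."""
--     counts = {}
--     for ch in str(guess_num):
--         counts[ch] = counts.get(ch, 0) + 1
--     return sum(counts.get(d, 0) for d in set(str(secret_num)))
-- ===== Notes on version B (the rewrite author's own statement) =====
-- stated objective: alternative
-- what changed: Inverts the traversal: instead of looping over guess digits and substring-testing each against str(secret_num), B builds a frequency table of the guess's characters once and sums its counts over the distinct characters of str(secret_num).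
import Mathlib
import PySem

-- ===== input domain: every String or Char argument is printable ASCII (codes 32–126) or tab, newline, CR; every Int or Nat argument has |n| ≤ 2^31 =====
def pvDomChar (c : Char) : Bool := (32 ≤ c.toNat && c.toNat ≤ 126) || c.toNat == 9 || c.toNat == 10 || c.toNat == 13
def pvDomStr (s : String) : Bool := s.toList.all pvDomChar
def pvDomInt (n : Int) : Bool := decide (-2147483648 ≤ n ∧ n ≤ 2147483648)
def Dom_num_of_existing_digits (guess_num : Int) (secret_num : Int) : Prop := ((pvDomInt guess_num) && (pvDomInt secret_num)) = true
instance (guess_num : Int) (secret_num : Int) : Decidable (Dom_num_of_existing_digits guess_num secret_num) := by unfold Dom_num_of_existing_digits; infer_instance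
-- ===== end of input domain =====

-- B replaces A's "for each guess digit, substring-test the secret" by a frequency table of the
-- guess's characters summed over the distinct characters of the secret (alternative decomposition).


-- ===== PORT A =====
-- helper is_digit_exist: "str(digit) in str(num)" — string ops ported on the List Char side (PySem.Chars is exact there)
def pvIsDigitExist (num : Int) (digit : Int) : Bool :=
  PySem.Chars.isIn (PySem.Int.toChars digit) (PySem.Int.toChars num)

def num_of_existing_digits (guess_num : Int) (secret_num : Int) : Int :=
  (PySem.Int.toChars guess_num).foldl
    (fun existing_digits digit_str =>
      match PySem.Int.ofChars? [digit_str] with  -- int(digit_str); none = ValueError, excluded by Pre_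
      | none => existing_digits
      | some digit =>
        if pvIsDigitExist secret_num digit then existing_digits + 1 else existing_digits)
    0

-- ===== PORT B =====
-- counts = the frequency table Source B builds over str(guess_num)
def pvCounts (guess_num : Int) : PySem.Dict Char Int :=
  (PySem.Int.toChars guess_num).foldl (fun d ch => d.insert ch (d.getD ch 0 + 1)) PySem.Dict.empty

def num_of_existing_digits_alt (guess_num : Int) (secret_num : Int) : Int :=
  (PySem.Set.ofList (PySem.Int.toChars secret_num)).foldl
    (fun acc d => acc + (pvCounts guess_num).getD d 0) 0

-- ===== PRECONDITION & SPEC =====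
-- Pre_ excludes guess_num < 0: there A raises ValueError on int('-') (the sign character of str(guess_num)).
def Pre_num_of_existing_digits (guess_num : Int) (secret_num : Int) : Prop := 0 ≤ guess_num
instance (guess_num : Int) (secret_num : Int) : Decidable (Pre_num_of_existing_digits guess_num secret_num) := by unfold Pre_num_of_existing_digits; infer_instance
def pvWitness_num_of_existing_digits : Int × Int := (1022, -210)

def Spec_num_of_existing_digits (guess_num : Int) (secret_num : Int) (out : Int) : Prop := out = num_of_existing_digits_alt guess_num secret_num
instance (guess_num : Int) (secret_num : Int) (out : Int) : Decidable (Spec_num_of_existing_digits guess_num secret_num out) := by unfold Spec_num_of_existing_digits; infer_instance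

-- ===== CLAIM (what is proved, stated in full; the proofs are below) =====
def Claim_equal_num_of_existing_digits : Prop := ∀ (guess_num : Int) (secret_num : Int), Dom_num_of_existing_digits guess_num secret_num → Pre_num_of_existing_digits guess_num secret_num → Spec_num_of_existing_digits guess_num secret_num (num_of_existing_digits guess_num secret_num)

-- ===== LEMMAS AND PROOFS =====

-- the ten decimal digit characters
def pvDigitChars : List Char := ['0','1','2','3','4','5','6','7','8','9']

lemma pv_digitChar_mem (m : Nat) (h : m < 10) : Nat.digitChar m ∈ pvDigitChars := by
  interval_cases m <;> decide

lemma pv_mem_toDigitsCore (f n : Nat) (acc : List Char) (c : Char)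
    (hc : c ∈ Nat.toDigitsCore 10 f n acc) : c ∈ acc ∨ c ∈ pvDigitChars := by
  induction f generalizing n acc with
  | zero => exact Or.inl hc
  | succ f ih =>
    simp only [Nat.toDigitsCore] at hc
    split at hc
    · rcases List.mem_cons.mp hc with h | h
      · exact Or.inr (h ▸ pv_digitChar_mem _ (Nat.mod_lt _ (by norm_num)))
      · exact Or.inl h
    · rcases ih _ _ hc with h | h
      · rcases List.mem_cons.mp h with h' | h'
        · exact Or.inr (h' ▸ pv_digitChar_mem _ (Nat.mod_lt _ (by norm_num)))
        · exact Or.inl h'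
      · exact Or.inr h

lemma pv_mem_toChars_nonneg (n : Int) (hn : 0 ≤ n) (c : Char)
    (hc : c ∈ PySem.Int.toChars n) : c ∈ pvDigitChars := by
  simp only [PySem.Int.toChars, if_neg (not_lt.mpr hn)] at hc
  rcases pv_mem_toDigitsCore _ _ _ _ hc with h | h
  · simp at h
  · exact h

-- '[c] in S' is just membership
lemma pv_isIn_singleton (c : Char) (S : List Char) :
    PySem.Chars.isIn [c] S = S.contains c := by
  rcases h : S.contains c with _ | _
  · rw [PySem.Chars.isIn_eq_false_iff]
    intro hinf
    have hcS : c ∈ S := hinf.subset (by simp)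
    simp [hcS] at h
  · rw [PySem.Chars.isIn_iff_infix]
    obtain ⟨a, b, rfl⟩ := List.mem_iff_append.mp (List.contains_iff_mem.mp h)
    exact ⟨a, b, by simp⟩

-- A's loop body, on a digit character
lemma pv_step_digit (c : Char) (hc : c ∈ pvDigitChars) (s acc : Int) :
    (match PySem.Int.ofChars? [c] with
      | none => acc
      | some digit => if pvIsDigitExist s digit then acc + 1 else acc)
    = (if PySem.Chars.isIn [c] (PySem.Int.toChars s) then acc + 1 else acc) := by
  fin_cases hc <;> rfl

-- a 0/1 indicator summed over a duplicate-free list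
lemma pv_sum_indicator (c : Char) (D : List Char) (hD : D.Nodup) :
    (D.map (fun d => ((if d = c then 1 else 0) : Int))).sum = if c ∈ D then 1 else 0 := by
  induction D with
  | nil => simp
  | cons d D ih =>
    simp only [List.nodup_cons] at hD
    rw [List.map_cons, List.sum_cons, ih hD.2]
    by_cases h : d = c
    · subst h; simp [hD.1]
    · simp [h, Ne.symm h]

-- Σ_{d ∈ D} count d G = #{c ∈ G : c ∈ D} for a duplicate-free D
lemma pv_sum_count (G : List Char) (D : List Char) (hD : D.Nodup) :
    (D.map (fun d => (List.count d G : Int))).sum = (G.countP (fun c => D.contains c) : Int) := by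
  induction G with
  | nil => simp
  | cons c G ih =>
    have hsplit : D.map (fun d => (List.count d (c :: G) : Int))
        = D.map (fun d => (List.count d G : Int) + (if d = c then 1 else 0)) := by
      apply List.map_congr_left
      intro d _
      by_cases h : d = c
      · subst h; simp [List.count_cons_self]
      · simp [h, Ne.symm h]
    rw [hsplit, PySem.List.sum_map_add_int, ih, pv_sum_indicator c D hD, List.countP_cons]
    by_cases h : c ∈ D <;> simp [h]

theorem pv_main (g s : Int) (hg : 0 ≤ g) :
    num_of_existing_digits g s = num_of_existing_digits_alt g s := by
  have hA : num_of_existing_digits g s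
      = ((PySem.Int.toChars g).countP (fun c => (PySem.Int.toChars s).contains c) : Int) := by
    show (PySem.Int.toChars g).foldl _ 0 = _
    rw [PySem.List.foldl_congr_mem _ _
        (fun acc c => if (PySem.Int.toChars s).contains c then acc + 1 else acc) 0
        (fun acc c hcG => by
          rw [pv_step_digit c (pv_mem_toChars_nonneg g hg c hcG) s acc, pv_isIn_singleton]),
      PySem.List.foldl_if_add_one]
    ring
  have hB : num_of_existing_digits_alt g s
      = ((PySem.Set.ofList (PySem.Int.toChars s)).map
          (fun d => (List.count d (PySem.Int.toChars g) : Int))).sum := by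
    unfold num_of_existing_digits_alt pvCounts
    rw [PySem.Dict.foldl_insert_getD_add_one_eq_counter, PySem.List.foldl_add]
    simp [PySem.Dict.getD_counter]
  rw [hA, hB, pv_sum_count _ _ (PySem.Set.nodup_ofList _)]
  congr 1
  apply List.countP_congr
  intro c _
  simp [PySem.Set.mem_ofList]
-- ===== VERDICT (by name: the statement is the Claim_ definition above) =====
theorem num_of_existing_digits_spec : Claim_equal_num_of_existing_digits := by
  intro g s _ hg
  exact pv_main g s hg
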